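-- pv_equiv track=rewrite | github.com/PatinaHo/CheckiO_Py_solution | string_count_repeat_letter.py | long_repeat
-- ===== SOURCE A (Python) =====
-- def long_repeat(line):
--     """
--         length the longest substring that consists of the same char
--     """
--     if (line == ''):
--         return 0
--     front = line[0]
--     count = 1
--     maximum = 1
--     for char in line[1:]:
--         if (char == front):
--             count += 1
--             if (count > maximum):
--                 maximum = count
--         else:
--             count = 1
--         front = char
--
--     return maximum
-- ===== SOURCE B (Python) =====
-- def long_repeat(line):
--     # group-then-reduce: build the list of run lengths, then reduce for the max
--     lengths = []
--     prev = None
--     for ch in line: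
--         if ch == prev:
--             lengths[-1] += 1
--         else:
--             lengths.append(1)
--         prev = ch
--     best = 0
--     for n in lengths:
--         if n > best:
--             best = n
--     return best
-- ===== Notes on version B (the rewrite author's own statement) =====
-- stated objective: alternative
-- what changed: A tracks a running counter and maximum in one fused loop; B first groups the string into an explicit run-length list (extending or starting a run per char) and then reduces that list to its maximum in a second pass.
import Mathlib
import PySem

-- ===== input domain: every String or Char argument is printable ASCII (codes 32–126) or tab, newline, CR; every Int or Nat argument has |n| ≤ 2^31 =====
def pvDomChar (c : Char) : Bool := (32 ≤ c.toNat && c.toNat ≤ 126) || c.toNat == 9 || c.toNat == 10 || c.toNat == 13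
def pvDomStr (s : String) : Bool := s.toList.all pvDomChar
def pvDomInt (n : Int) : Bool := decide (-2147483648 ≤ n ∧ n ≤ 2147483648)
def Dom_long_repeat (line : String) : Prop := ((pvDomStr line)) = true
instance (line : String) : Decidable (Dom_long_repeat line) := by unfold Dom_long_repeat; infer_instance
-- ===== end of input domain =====

-- B builds an explicit run-length list and reduces it to its max, instead of A's fused counter/max loop (alternative decomposition; return values proved equal).


-- ===== PORT A =====
-- one loop step of A: state (front, count, maximum)
def pvStepA (st : Char × Int × Int) (ch : Char) : Char × Int × Int :=
  match st with
  | (front, count, maximum) =>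
    if ch == front then
      let count := count + 1
      let maximum := if count > maximum then count else maximum
      (ch, count, maximum)
    else
      (ch, 1, maximum)

def long_repeat (line : String) : Int :=
  if line == "" then 0
  else
    match line.toList with
    | [] => 0
    | front :: rest => ((rest.foldl pvStepA (front, 1, 1)).2.2)

-- ===== PORT B =====
-- one step of B's first loop: state (lengths, prev); 'lengths[-1] += 1' is replace-last
def pvStepB (st : List Int × Option Char) (ch : Char) : List Int × Option Char :=
  match st with
  | (lengths, prev) =>
    if some ch == prev then
      (lengths.dropLast ++ [lengths.getLastD 0 + 1], some ch)
    else
      (lengths ++ [1], some ch)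

-- one step of B's second loop ('if n > best: best = n')
def pvMaxStep (best n : Int) : Int := if n > best then n else best

def long_repeat_alt (line : String) : Int :=
  ((line.toList.foldl pvStepB ([], none)).1).foldl pvMaxStep 0

-- ===== PRECONDITION & SPEC =====
def Spec_long_repeat (line : String) (out : Int) : Prop := out = long_repeat_alt line
instance (line : String) (out : Int) : Decidable (Spec_long_repeat line out) := by unfold Spec_long_repeat; infer_instance

-- ===== CLAIM (what is proved, stated in full; the proofs are below) =====
def Claim_equal_long_repeat : Prop := ∀ (line : String), Dom_long_repeat line → Spec_long_repeat line (long_repeat line)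

-- ===== LEMMAS AND PROOFS =====

lemma pvMaxD_concat (X : List Int) (y : Int) :
    (X ++ [y]).foldl pvMaxStep 0 = pvMaxStep (X.foldl pvMaxStep 0) y := by
  simp [List.foldl_append]

-- invariant: B's run-length list ends with A's current count, its max-reduction is A's maximum
lemma pv_inv (cs : List Char) : ∀ (X : List Int) (f : Char) (c m : Int),
    1 ≤ c → c ≤ m → (X ++ [c]).foldl pvMaxStep 0 = m →
    ((cs.foldl pvStepB (X ++ [c], some f)).1).foldl pvMaxStep 0
      = (cs.foldl pvStepA (f, c, m)).2.2 := by
  induction cs with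
  | nil => intro X f c m _ _ hmax; simpa using hmax
  | cons ch cs ih =>
    intro X f c m hc hcm hmax
    by_cases h : ch = f
    · subst h
      have hB : pvStepB (X ++ [c], some ch) ch = (X ++ [c + 1], some ch) := by
        simp [pvStepB]
      have hA : pvStepA (ch, c, m) ch =
          (ch, c + 1, if c + 1 > m then c + 1 else m) := by
        simp [pvStepA]
      rw [List.foldl_cons, List.foldl_cons, hB, hA]
      apply ih
      · omega
      · split <;> omega
      · rw [pvMaxD_concat] at hmax ⊢
        simp only [pvMaxStep] at hmax ⊢
        split_ifs at hmax ⊢ <;> omega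
    · have hB : pvStepB (X ++ [c], some f) ch = ((X ++ [c]) ++ [1], some ch) := by
        simp [pvStepB, h]
      have hA : pvStepA (f, c, m) ch = (ch, 1, m) := by
        simp [pvStepA, h]
      rw [List.foldl_cons, List.foldl_cons, hB, hA]
      apply ih
      · omega
      · omega
      · rw [pvMaxD_concat, hmax]
        simp only [pvMaxStep]
        split_ifs <;> omega

-- ===== VERDICT (by name: the statement is the Claim_ definition above) =====
theorem long_repeat_spec : Claim_equal_long_repeat := by
  intro line _
  unfold Spec_long_repeat long_repeat long_repeat_alt
  by_cases h : line = ""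
  · subst h; rfl
  · have hne : (line == "") = false := by simpa using h
    rw [hne]
    simp only [Bool.false_eq_true, if_false]
    cases hl : line.toList with
    | nil =>
      exact absurd (by simpa using String.toList_eq_nil_iff.mp hl) h
    | cons c cs =>
      rw [List.foldl_cons]
      have hB0 : pvStepB ([], none) c = (([] : List Int) ++ [1], some c) := by
        simp [pvStepB]
      rw [hB0]
      exact (pv_inv cs [] c 1 1 (by omega) (by omega) (by simp [pvMaxStep])).symm
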